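-- pv_equiv track=rewrite | github.com/rashmiranjanaiet/TEAM-FLOW-WEB-HACKTHON | backend/app/services/neo_processing.py | pick_close_approach
-- ===== SOURCE A (Python) =====
-- def pick_close_approach(asteroid, approach_date):
--     entries = asteroid.get('close_approach_data') or []
--     for idx, entry in enumerate(entries):
--         if entry.get('close_approach_date') == approach_date and entry.get('orbiting_body') == 'Earth':
--             return idx, entry
--     for idx, entry in enumerate(entries):
--         if entry.get('orbiting_body') == 'Earth':
--             return idx, entry
--     if entries:
--         return 0, entries[0]
--     return None, {}
-- ===== SOURCE B (Python) =====
-- def pick_close_approach(asteroid, approach_date):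
--     entries = asteroid.get('close_approach_data') or []
--     if not entries:
--         return None, {}
--
--     def rank(pair):
--         idx, entry = pair
--         if entry.get('orbiting_body') == 'Earth':
--             r = 0 if entry.get('close_approach_date') == approach_date else 1
--         else:
--             r = 2
--         return (r, idx)
--
--     return min(enumerate(entries), key=rank)
-- ===== Notes on version B (the rewrite author's own statement) =====
-- stated objective: alternative
-- what changed: A's two staged linear scans plus positional fallback are replaced by ranking every entry (0 = date+Earth match, 1 = Earth, 2 = other) and taking the lexicographic minimum of (rank, index) over enumerate(entries) in one min() call; the all-rank-2 minimum is index 0, which reproduces A's (0, entries[0]) fallback.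
import Mathlib
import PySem

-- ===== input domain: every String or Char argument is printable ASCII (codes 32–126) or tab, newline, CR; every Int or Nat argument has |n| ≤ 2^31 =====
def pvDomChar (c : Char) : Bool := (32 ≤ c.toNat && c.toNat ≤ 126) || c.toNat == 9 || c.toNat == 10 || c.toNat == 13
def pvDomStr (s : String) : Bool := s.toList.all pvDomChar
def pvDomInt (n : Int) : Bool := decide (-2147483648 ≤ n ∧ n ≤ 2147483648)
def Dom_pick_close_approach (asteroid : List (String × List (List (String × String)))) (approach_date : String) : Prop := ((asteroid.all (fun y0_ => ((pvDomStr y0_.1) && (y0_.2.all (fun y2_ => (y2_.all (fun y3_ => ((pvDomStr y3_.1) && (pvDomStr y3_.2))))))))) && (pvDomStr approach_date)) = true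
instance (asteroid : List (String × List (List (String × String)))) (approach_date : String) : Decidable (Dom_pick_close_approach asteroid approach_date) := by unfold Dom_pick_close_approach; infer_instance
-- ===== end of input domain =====

-- ===== PORT A =====
-- B replaces A's two staged scans + positional fallback by one min() over (rank, index); return values proved equal below.
-- dict.get(k) on the association lists = first-match lookup (PySem.Dict)
def pvGet (d : List (String × String)) (k : String) : Option String :=
  (PySem.Dict.mk d).get? k

-- first loop of A: entry with matching date AND orbiting_body == 'Earth'
def pvScanDate (approach_date : String) : List (List (String × String)) → Int → Option (Int × List (String × String))
  | [], _ => none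
  | e :: rest, i =>
    if pvGet e "close_approach_date" == some approach_date && pvGet e "orbiting_body" == some "Earth" then
      some (i, e)
    else pvScanDate approach_date rest (i + 1)

-- second loop of A: first entry with orbiting_body == 'Earth'
def pvScanEarth : List (List (String × String)) → Int → Option (Int × List (String × String))
  | [], _ => none
  | e :: rest, i =>
    if pvGet e "orbiting_body" == some "Earth" then some (i, e)
    else pvScanEarth rest (i + 1)

def pick_close_approach (asteroid : List (String × List (List (String × String)))) (approach_date : String) : Option Int × (List (String × String)) :=
  let entries := ((PySem.Dict.mk asteroid).get? "close_approach_data").getD []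
  match pvScanDate approach_date entries 0 with
  | some (i, e) => (some i, e)
  | none =>
    match pvScanEarth entries 0 with
    | some (i, e) => (some i, e)
    | none =>
      match entries with
      | e :: _ => (some 0, e)
      | [] => (none, [])

-- ===== PORT B =====
-- Source B's rank(pair): 0 if Earth and the date matches, 1 if Earth, else 2 (the index is the second key component)
def pvRankB (d : String) (e : List (String × String)) : Int :=
  if pvGet e "orbiting_body" == some "Earth" then
    if pvGet e "close_approach_date" == some d then 0 else 1
  else 2

def pick_close_approach_alt (asteroid : List (String × List (List (String × String)))) (approach_date : String) : Option Int × (List (String × String)) :=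
  let entries := ((PySem.Dict.mk asteroid).get? "close_approach_data").getD []
  match entries with
  | [] => (none, [])
  | _ :: _ =>
    -- min(enumerate(entries), key=rank) with the lexicographic tuple key (rank, idx) = PySem.List.min2?
    match PySem.List.min2? (PySem.List.enumerate entries) (fun p => pvRankB approach_date p.2) (fun p => p.1) with
    | some (i, e) => (some i, e)
    | none => (none, [])

-- ===== PRECONDITION & SPEC =====
def Spec_pick_close_approach (asteroid : List (String × List (List (String × String)))) (approach_date : String) (out : Option Int × (List (String × String))) : Prop := out = pick_close_approach_alt asteroid approach_date
instance (asteroid : List (String × List (List (String × String)))) (approach_date : String) (out : Option Int × (List (String × String))) : Decidable (Spec_pick_close_approach asteroid approach_date out) := by unfold Spec_pick_close_approach; infer_instance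

-- ===== CLAIM =====
def Claim_equal_pick_close_approach : Prop := ∀ (asteroid : List (String × List (List (String × String)))) (approach_date : String), Dom_pick_close_approach asteroid approach_date → Spec_pick_close_approach asteroid approach_date (pick_close_approach asteroid approach_date)

-- ===== LEMMAS AND PROOFS =====
-- the folding step of min2? with keys (rank, idx)
def pvStep (d : String) (acc : Option (Int × List (String × String))) (x : Int × List (String × String)) : Option (Int × List (String × String)) :=
  match acc with
  | none => some x
  | some m =>
    if (decide (pvRankB d x.2 < pvRankB d m.2) || !decide (pvRankB d m.2 < pvRankB d x.2) && decide (x.1 < m.1)) = true then some x else some m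

-- pvStep never swaps on an index tie-break when the incoming index is not smaller
theorem pvStep_some (d : String) (m x : Int × List (String × String)) (h : ¬ x.1 < m.1) :
    pvStep d (some m) x = if pvRankB d x.2 < pvRankB d m.2 then some x else some m := by
  simp only [pvStep]
  have hx : decide (x.1 < m.1) = false := by simp [h]
  rw [hx]
  simp

-- running min of the enumerated tail against a best-so-far whose index is smaller than every coming index
theorem pvFold_min (d : String) (l : List (List (String × String))) :
    ∀ (i : Int) (m : Int × List (String × String)), m.1 < i →
    List.foldl (pvStep d) (some m) (PySem.List.enumerate l i) =
      (if pvRankB d m.2 = 0 then some m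
       else if pvRankB d m.2 = 1 then (pvScanDate d l i).or (some m)
       else (pvScanDate d l i).or ((pvScanEarth l i).or (some m))) := by
  induction l with
  | nil => intro i m _; simp [PySem.List.enumerate, pvScanDate, pvScanEarth]
  | cons e rest ih =>
    intro i m hm
    have hstep : PySem.List.enumerate (e :: rest) i = (i, e) :: PySem.List.enumerate rest (i + 1) := by
      simp [PySem.List.enumerate]
    rw [hstep, List.foldl_cons, pvStep_some d m (i, e) (by simp; omega)]
    cases hE : (pvGet e "orbiting_body" == some "Earth") with
    | true =>
      cases hD : (pvGet e "close_approach_date" == some d) with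
      | true =>
        have hre : pvRankB d e = 0 := by simp [pvRankB, hE, hD]
        have hsd : pvScanDate d (e :: rest) i = some (i, e) := by simp [pvScanDate, hE, hD]
        cases hmE : (pvGet m.2 "orbiting_body" == some "Earth") with
        | true =>
          cases hmD : (pvGet m.2 "close_approach_date" == some d) with
          | true =>
            have hrm : pvRankB d m.2 = 0 := by simp [pvRankB, hmE, hmD]
            rw [show ((i, e).2) = e from rfl, hre, hrm]
            rw [if_neg (show ¬((0:Int) < (0:Int)) by omega), ih (i + 1) m (by omega)]
            simp [hrm]
          | false =>
            have hrm : pvRankB d m.2 = 1 := by simp [pvRankB, hmE, hmD]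
            rw [show ((i, e).2) = e from rfl, hre, hrm]
            rw [if_pos (by omega), ih (i + 1) (i, e) (by omega)]
            simp [hre, hsd]
        | false =>
          have hrm : pvRankB d m.2 = 2 := by simp [pvRankB, hmE]
          rw [show ((i, e).2) = e from rfl, hre, hrm]
          rw [if_pos (by omega), ih (i + 1) (i, e) (by omega)]
          simp [hre, hsd]
      | false =>
        have hre : pvRankB d e = 1 := by simp [pvRankB, hE, hD]
        have hsd : pvScanDate d (e :: rest) i = pvScanDate d rest (i + 1) := by
          simp [pvScanDate, hD]
        have hse : pvScanEarth (e :: rest) i = some (i, e) := by simp [pvScanEarth, hE]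
        cases hmE : (pvGet m.2 "orbiting_body" == some "Earth") with
        | true =>
          cases hmD : (pvGet m.2 "close_approach_date" == some d) with
          | true =>
            have hrm : pvRankB d m.2 = 0 := by simp [pvRankB, hmE, hmD]
            rw [show ((i, e).2) = e from rfl, hre, hrm]
            rw [if_neg (by omega), ih (i + 1) m (by omega)]
            simp [hrm]
          | false =>
            have hrm : pvRankB d m.2 = 1 := by simp [pvRankB, hmE, hmD]
            rw [show ((i, e).2) = e from rfl, hre, hrm]
            rw [if_neg (by omega), ih (i + 1) m (by omega)]
            simp [hrm, hsd]
        | false =>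
          have hrm : pvRankB d m.2 = 2 := by simp [pvRankB, hmE]
          rw [show ((i, e).2) = e from rfl, hre, hrm]
          rw [if_pos (by omega), ih (i + 1) (i, e) (by omega)]
          simp [hre, hsd, hse]
    | false =>
      have hre : pvRankB d e = 2 := by simp [pvRankB, hE]
      have hsd : pvScanDate d (e :: rest) i = pvScanDate d rest (i + 1) := by
        simp [pvScanDate, hE]
      have hse : pvScanEarth (e :: rest) i = pvScanEarth rest (i + 1) := by
        simp [pvScanEarth, hE]
      cases hmE : (pvGet m.2 "orbiting_body" == some "Earth") with
      | true =>
        cases hmD : (pvGet m.2 "close_approach_date" == some d) with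
        | true =>
          have hrm : pvRankB d m.2 = 0 := by simp [pvRankB, hmE, hmD]
          rw [show ((i, e).2) = e from rfl, hre, hrm]
          rw [if_neg (by omega), ih (i + 1) m (by omega)]
          simp [hrm]
        | false =>
          have hrm : pvRankB d m.2 = 1 := by simp [pvRankB, hmE, hmD]
          rw [show ((i, e).2) = e from rfl, hre, hrm]
          rw [if_neg (by omega), ih (i + 1) m (by omega)]
          simp [hrm, hsd]
      | false =>
        have hrm : pvRankB d m.2 = 2 := by simp [pvRankB, hmE]
        rw [show ((i, e).2) = e from rfl, hre, hrm]
        rw [if_neg (by omega), ih (i + 1) m (by omega)]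
        simp [hrm, hsd, hse]

-- ===== VERDICT =====
theorem pick_close_approach_spec : Claim_equal_pick_close_approach := by
  intro asteroid approach_date _
  unfold Spec_pick_close_approach pick_close_approach pick_close_approach_alt
  dsimp only
  cases hent : ((PySem.Dict.mk asteroid).get? "close_approach_data").getD [] with
  | nil => simp [pvScanDate, pvScanEarth]
  | cons e rest =>
    have hmin : PySem.List.min2? (PySem.List.enumerate (e :: rest)) (fun p => pvRankB approach_date p.2) (fun p => p.1) =
        List.foldl (pvStep approach_date) none (PySem.List.enumerate (e :: rest)) := by
      simp only [PySem.List.min2?]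
      apply List.foldl_ext
      intro acc x _
      cases acc <;> rfl
    have hstep : PySem.List.enumerate (e :: rest) (0 : Int) = ((0 : Int), e) :: PySem.List.enumerate rest 1 := by
      simp [PySem.List.enumerate]
    have hstart : pvStep approach_date none ((0 : Int), e) = some ((0 : Int), e) := rfl
    rw [hmin, hstep, List.foldl_cons, hstart, pvFold_min approach_date rest 1 (0, e) (by omega)]
    cases hE : (pvGet e "orbiting_body" == some "Earth") with
    | true =>
      cases hD : (pvGet e "close_approach_date" == some approach_date) with
      | true =>
        have hre : pvRankB approach_date e = 0 := by simp [pvRankB, hE, hD]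
        have hsd : pvScanDate approach_date (e :: rest) 0 = some (0, e) := by
          simp [pvScanDate, hE, hD]
        simp [hre, hsd]
      | false =>
        have hre : pvRankB approach_date e = 1 := by simp [pvRankB, hE, hD]
        have hsd : pvScanDate approach_date (e :: rest) 0 = pvScanDate approach_date rest 1 := by
          simp [pvScanDate, hD]
        have hse : pvScanEarth (e :: rest) 0 = some (0, e) := by simp [pvScanEarth, hE]
        simp only [hre, hsd, hse]
        cases h1 : pvScanDate approach_date rest 1 <;> simp
    | false =>
      have hre : pvRankB approach_date e = 2 := by simp [pvRankB, hE]
      have hsd : pvScanDate approach_date (e :: rest) 0 = pvScanDate approach_date rest 1 := by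
        simp [pvScanDate, hE]
      have hse : pvScanEarth (e :: rest) 0 = pvScanEarth rest 1 := by simp [pvScanEarth, hE]
      simp only [hre, hsd, hse]
      cases h1 : pvScanDate approach_date rest 1 <;> cases h2 : pvScanEarth rest 1 <;> simp
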